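-- pv_equiv track=rewrite | github.com/ro-ot/linux | tools/perf/tests/shell/lib/attr.py | data_equal
-- ===== SOURCE A (Python) =====
-- def data_equal(a, b):
--     # Allow multiple values in assignment separated by '|'
--     a_list = a.split('|')
--     b_list = b.split('|')
--
--     for a_item in a_list:
--         for b_item in b_list:
--             if (a_item == b_item):
--                 return True
--             elif (a_item == '*') or (b_item == '*'):
--                 return True
--
--     return False
-- ===== SOURCE B (Python) =====
-- def data_equal(a, b):
--     # Allow multiple values in assignment separated by '|'
--     a_set = set(a.split('|'))
--     b_set = set(b.split('|'))
--     # split always yields a non-empty list, so a bare '*' matches anything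
--     if '*' in a_set or '*' in b_set:
--         return True
--     return bool(a_set & b_set)
-- ===== Notes on version B (the rewrite author's own statement) =====
-- stated objective: simpler
-- what changed: Replaces the nested pairwise scan over the two split lists by building two sets once and testing '*' membership plus a single set intersection.
import Mathlib
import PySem

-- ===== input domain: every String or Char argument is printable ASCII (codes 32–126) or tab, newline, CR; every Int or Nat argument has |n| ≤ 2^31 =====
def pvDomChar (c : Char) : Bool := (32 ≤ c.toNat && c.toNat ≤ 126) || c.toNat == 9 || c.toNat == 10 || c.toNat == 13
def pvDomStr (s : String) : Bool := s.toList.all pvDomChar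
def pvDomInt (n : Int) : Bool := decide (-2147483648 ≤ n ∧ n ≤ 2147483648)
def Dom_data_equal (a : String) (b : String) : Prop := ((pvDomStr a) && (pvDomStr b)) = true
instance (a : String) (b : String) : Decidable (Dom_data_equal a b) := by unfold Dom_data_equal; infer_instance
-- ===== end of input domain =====

-- B replaces A's nested pairwise scan with two sets and one intersection test (objective: simpler).

-- ===== PORT A =====
-- a.split('|') with the non-empty separator '|' is exact as PySem.Chars.splitOn.
def data_equal (a : String) (b : String) : Bool :=
  let a_list := (PySem.Chars.splitOn a.toList ['|']).map String.ofList
  let b_list := (PySem.Chars.splitOn b.toList ['|']).map String.ofList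
  -- the two for-loops with early 'return True' and final 'return False'
  a_list.any (fun a_item =>
    b_list.any (fun b_item =>
      if a_item == b_item then true
      else if a_item == "*" || b_item == "*" then true
      else false))

-- ===== PORT B =====
def data_equal_alt (a : String) (b : String) : Bool :=
  let a_set : PySem.Set String := PySem.Set.ofList ((PySem.Chars.splitOn a.toList ['|']).map String.ofList)
  let b_set : PySem.Set String := PySem.Set.ofList ((PySem.Chars.splitOn b.toList ['|']).map String.ofList)
  if PySem.Set.contains a_set "*" || PySem.Set.contains b_set "*" then true
  else !(PySem.Set.inter a_set b_set).isEmpty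

-- ===== PRECONDITION & SPEC =====
def Spec_data_equal (a : String) (b : String) (out : Bool) : Prop := out = data_equal_alt a b
instance (a : String) (b : String) (out : Bool) : Decidable (Spec_data_equal a b out) := by unfold Spec_data_equal; infer_instance

-- ===== CLAIM (what is proved, stated in full; the proofs are below) =====
def Claim_equal_data_equal : Prop := ∀ (a : String) (b : String), Dom_data_equal a b → Spec_data_equal a b (data_equal a b)

-- ===== LEMMAS AND PROOFS =====

theorem splitOn_go_ne_nil (sep : List Char) (fuel : Nat) (l cur : List Char)
    (acc : List (List Char)) : PySem.Chars.splitOn.go sep fuel l cur acc ≠ [] := by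
  induction fuel generalizing l cur acc with
  | zero => simp [PySem.Chars.splitOn.go]
  | succ n ih =>
    cases l with
    | nil => simp [PySem.Chars.splitOn.go]
    | cons c rest =>
      rw [PySem.Chars.splitOn.go]
      split
      · exact ih _ _ _
      · exact ih _ _ _

theorem splitOn_ne_nil (s sep : List Char) : PySem.Chars.splitOn s sep ≠ [] :=
  splitOn_go_ne_nil sep _ s [] []

theorem data_equal_eq_iff (a b : String) :
    data_equal a b = true ↔
      ∃ x ∈ (PySem.Chars.splitOn a.toList ['|']).map String.ofList,
        ∃ y ∈ (PySem.Chars.splitOn b.toList ['|']).map String.ofList,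
          x = y ∨ x = "*" ∨ y = "*" := by
  simp only [data_equal, List.any_eq_true]
  constructor
  · rintro ⟨x, hx, y, hy, h⟩
    refine ⟨x, hx, y, hy, ?_⟩
    revert h; split_ifs with h1 h2 <;> intro h
    · exact Or.inl (by simpa using h1)
    · rcases Bool.or_eq_true_iff.mp h2 with h | h
      · exact Or.inr (Or.inl (by simpa using h))
      · exact Or.inr (Or.inr (by simpa using h))
    · simp at h
  · rintro ⟨x, hx, y, hy, h⟩
    refine ⟨x, hx, y, hy, ?_⟩
    split_ifs with h1 h2
    · rfl
    · rfl
    · rcases h with h | h | h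
      · exact absurd h (by simpa using h1)
      · exact absurd (Bool.or_eq_true_iff.mpr (Or.inl (by simpa using h))) h2
      · exact absurd (Bool.or_eq_true_iff.mpr (Or.inr (by simpa using h))) h2

theorem data_equal_alt_eq_iff (a b : String) :
    data_equal_alt a b = true ↔
      ("*" ∈ (PySem.Chars.splitOn a.toList ['|']).map String.ofList ∨
       "*" ∈ (PySem.Chars.splitOn b.toList ['|']).map String.ofList) ∨
      ∃ x, x ∈ (PySem.Chars.splitOn a.toList ['|']).map String.ofList ∧
           x ∈ (PySem.Chars.splitOn b.toList ['|']).map String.ofList := by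
  simp only [data_equal_alt]
  split_ifs with h
  · simp only [true_iff]
    rcases Bool.or_eq_true_iff.mp h with h | h
    · exact Or.inl (Or.inl (by simpa [PySem.Set.contains_iff, PySem.Set.mem_ofList] using h))
    · exact Or.inl (Or.inr (by simpa [PySem.Set.contains_iff, PySem.Set.mem_ofList] using h))
  · rw [Bool.not_eq_eq_eq_not, Bool.not_true, List.isEmpty_eq_false_iff_exists_mem]
    constructor
    · rintro ⟨x, hx⟩
      have := (PySem.Set.mem_inter _ _ _).mp hx
      exact Or.inr ⟨x, (PySem.Set.mem_ofList _ _).mp this.1, (PySem.Set.mem_ofList _ _).mp this.2⟩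
    · rintro ((hs | hs) | ⟨x, hx, hy⟩)
      · exact absurd (Bool.or_eq_true_iff.mpr (Or.inl
          ((PySem.Set.contains_iff _ _).mpr ((PySem.Set.mem_ofList _ _).mpr hs)))) h
      · exact absurd (Bool.or_eq_true_iff.mpr (Or.inr
          ((PySem.Set.contains_iff _ _).mpr ((PySem.Set.mem_ofList _ _).mpr hs)))) h
      · exact ⟨x, (PySem.Set.mem_inter _ _ _).mpr ⟨(PySem.Set.mem_ofList _ _).mpr hx, (PySem.Set.mem_ofList _ _).mpr hy⟩⟩

-- ===== VERDICT (by name: the statement is the Claim_ definition above) =====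
theorem data_equal_spec : Claim_equal_data_equal := by
  intro a b _
  unfold Spec_data_equal
  have hA := splitOn_ne_nil a.toList ['|']
  have hB := splitOn_ne_nil b.toList ['|']
  obtain ⟨xa, hxa⟩ := List.exists_mem_of_ne_nil _ hA
  obtain ⟨xb, hxb⟩ := List.exists_mem_of_ne_nil _ hB
  have hxa' : String.ofList xa ∈ (PySem.Chars.splitOn a.toList ['|']).map String.ofList :=
    List.mem_map_of_mem hxa
  have hxb' : String.ofList xb ∈ (PySem.Chars.splitOn b.toList ['|']).map String.ofList :=
    List.mem_map_of_mem hxb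
  apply Eq.symm
  rw [Bool.eq_iff_iff, data_equal_alt_eq_iff, data_equal_eq_iff]
  constructor
  · rintro ((hs | hs) | ⟨x, hx, hy⟩)
    · exact ⟨"*", hs, _, hxb', Or.inr (Or.inl rfl)⟩
    · exact ⟨_, hxa', "*", hs, Or.inr (Or.inr rfl)⟩
    · exact ⟨x, hx, x, hy, Or.inl rfl⟩
  · rintro ⟨x, hx, y, hy, (rfl | rfl | rfl)⟩
    · exact Or.inr ⟨x, hx, hy⟩
    · exact Or.inl (Or.inl hx)
    · exact Or.inl (Or.inr hy)
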